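-- pv_equiv track=rewrite | github.com/HackerCalico/Magic_C2 | Client/bin/Release/script/RunScript.py | GetSelfAsmHash
-- ===== SOURCE A (Python) =====
-- def GetSelfAsmHash(selfAsm):
--     hash = 0
--     for byte in selfAsm:
--         hash += ord(byte)
--         hash = (hash << 8) - hash
--     hash &= 0xffffffff  # 保留 32 位
--     if hash & 0x80000000:  # 负数
--         hash = -((~hash + 1) & 0xffffffff)
--     return str(hash)
-- ===== SOURCE B (Python) =====
-- def GetSelfAsmHash(selfAsm):
--     acc = 0
--     power = 255
--     for byte in reversed(selfAsm):
--         acc += ord(byte) * power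
--         power *= 255
--     acc &= 0xffffffff
--     if acc & 0x80000000:
--         acc = -((~acc + 1) & 0xffffffff)
--     return str(acc)
-- ===== Notes on version B (the rewrite author's own statement) =====
-- stated objective: alternative
-- what changed: Replaces A's Horner recurrence hash=(hash+ord(b))*255 over the bytes with a reverse-order pass that sums ord(b)*power while maintaining an explicit power-of-255 accumulator, then applies the same 32-bit mask and sign fold.
import Mathlib
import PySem

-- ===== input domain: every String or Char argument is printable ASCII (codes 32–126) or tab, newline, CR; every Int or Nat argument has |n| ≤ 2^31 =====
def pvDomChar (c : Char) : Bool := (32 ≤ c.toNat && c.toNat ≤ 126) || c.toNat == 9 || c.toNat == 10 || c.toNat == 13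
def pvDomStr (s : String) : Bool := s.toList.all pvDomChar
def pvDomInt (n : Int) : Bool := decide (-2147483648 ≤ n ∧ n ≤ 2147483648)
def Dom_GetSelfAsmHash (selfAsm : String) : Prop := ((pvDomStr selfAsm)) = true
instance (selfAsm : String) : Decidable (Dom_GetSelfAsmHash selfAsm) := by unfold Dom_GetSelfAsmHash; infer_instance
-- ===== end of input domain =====

-- B computes the same 32-bit rolling hash by summing ord(byte)*255^k over the REVERSED bytes with an
-- explicit power accumulator instead of A's Horner recurrence (hash+ord)*255; same cost, different decomposition.

-- ===== PORT A =====
def GetSelfAsmHash (selfAsm : String) : String :=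
  let hash : Int :=
    selfAsm.toList.foldl (fun hash byte =>
      let hash := hash + (byte.toNat : Int)   -- hash += ord(byte)
      (hash <<< (8 : Nat)) - hash)            -- hash = (hash << 8) - hash
      0
  let hash := PySem.Int.band hash 0xffffffff
  let hash := if PySem.Int.band hash 0x80000000 ≠ 0 then -(PySem.Int.band ((Int.not hash) + 1) 0xffffffff) else hash
  PySem.Int.toStr hash

-- ===== PORT B =====
def GetSelfAsmHash_alt (selfAsm : String) : String :=
  -- (acc, power) pair fold over the reversed bytes; acc is its first component
  let acc :=
    (selfAsm.toList.reverse.foldl (fun p byte =>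
      ((p.1 + (byte.toNat : Int) * p.2, p.2 * 255) : Int × Int))
      (0, 255)).1
  let acc := PySem.Int.band acc 0xffffffff
  let acc := if PySem.Int.band acc 0x80000000 ≠ 0 then -(PySem.Int.band ((Int.not acc) + 1) 0xffffffff) else acc
  PySem.Int.toStr acc

-- ===== PRECONDITION & SPEC =====
def Spec_GetSelfAsmHash (selfAsm : String) (out : String) : Prop := out = GetSelfAsmHash_alt selfAsm
instance (selfAsm : String) (out : String) : Decidable (Spec_GetSelfAsmHash selfAsm out) := by unfold Spec_GetSelfAsmHash; infer_instance

-- ===== CLAIM (what is proved, stated in full; the proofs are below) =====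
def Claim_equal_GetSelfAsmHash : Prop := ∀ (selfAsm : String), Dom_GetSelfAsmHash selfAsm → Spec_GetSelfAsmHash selfAsm (GetSelfAsmHash selfAsm)

-- ===== LEMMAS AND PROOFS =====

/-- polynomial value of A's Horner fold: Σ c_i · 255^(n-i) counting from the front. -/
def pvS : List Char → Int
  | [] => 0
  | c :: cs => (c.toNat : Int) * 255 ^ (cs.length + 1) + pvS cs

/-- polynomial value of B's reverse fold with starting power p. -/
def pvR : List Char → Int → Int
  | [], _ => 0
  | c :: cs, p => (c.toNat : Int) * p + pvR cs (p * 255)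

theorem pvA_fold (l : List Char) (h : Int) :
    l.foldl (fun hash byte =>
      let hash := hash + (byte.toNat : Int)
      (hash <<< (8 : Nat)) - hash) h
      = h * 255 ^ l.length + pvS l := by
  induction l generalizing h with
  | nil => simp [pvS]
  | cons c cs ih =>
    simp only [List.foldl_cons]
    rw [ih]
    simp only [pvS, List.length_cons, Int.shiftLeft_eq]
    ring

theorem pvB_fold (l : List Char) (a p : Int) :
    (l.foldl (fun p byte => ((p.1 + (byte.toNat : Int) * p.2, p.2 * 255) : Int × Int)) (a, p)).1
      = a + pvR l p := by
  induction l generalizing a p with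
  | nil => simp [pvR]
  | cons c cs ih =>
    simp only [List.foldl_cons]
    rw [ih]
    simp only [pvR]
    ring

theorem pvR_append (xs ys : List Char) (p : Int) :
    pvR (xs ++ ys) p = pvR xs p + pvR ys (p * 255 ^ xs.length) := by
  induction xs generalizing p with
  | nil => simp [pvR]
  | cons c cs ih =>
    simp only [List.cons_append, pvR, ih, List.length_cons]
    have hp : p * 255 ^ (cs.length + 1) = p * 255 * 255 ^ cs.length := by ring
    rw [hp]
    ring

theorem pvS_eq_pvR_reverse (l : List Char) : pvS l = pvR l.reverse 255 := by
  induction l with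
  | nil => rfl
  | cons c cs ih =>
    simp only [pvS, List.reverse_cons, pvR_append, pvR, ih, List.length_reverse]
    ring

-- ===== VERDICT (by name: the statement is the Claim_ definition above) =====
theorem pv_key (l : List Char) :
    l.foldl (fun hash byte =>
      let hash := hash + (byte.toNat : Int)
      (hash <<< (8 : Nat)) - hash) 0
      = (l.reverse.foldl (fun p byte =>
          ((p.1 + (byte.toNat : Int) * p.2, p.2 * 255) : Int × Int)) (0, 255)).1 := by
  rw [pvA_fold, pvB_fold, pvS_eq_pvR_reverse]
  ring

-- ===== VERDICT (by name: the statement is the Claim_ definition above) =====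
theorem GetSelfAsmHash_spec : Claim_equal_GetSelfAsmHash := by
  intro s _
  show GetSelfAsmHash s = GetSelfAsmHash_alt s
  unfold GetSelfAsmHash GetSelfAsmHash_alt
  rw [pv_key s.toList]
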